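-- pv_equiv track=rewrite | github.com/Vaishnavi-Palabatla/CP_Course | 04-fixmostlymagicsquare-Python/fixmostlymagicsquare.py | fixmostlymagicsquare
-- ===== SOURCE A (Python) =====
-- def getrowandsum(L):
-- 	sums = [sum(i) for i in L]
-- 	d = {}
-- 	for i in L:
-- 		Sum = sum(i)
-- 		if Sum in d:
-- 			d[Sum] += 1
-- 		else:
-- 			d[Sum] = 1
-- 	counts = [d[i] for i in sums]
-- 	rowtofix = counts.index(min(counts))
-- 	correctsum = sums[0]
-- 	if rowtofix == 0:
-- 		correctsum = sums[1]
-- 	return rowtofix,correctsum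
--
-- def missingnumber(s,L):
-- 	missing = 0
-- 	for i in range(1,(len(L)**2)+1):
-- 		if i not in s:
-- 			missing = i
-- 	return missing
--
-- def fixmostlymagicsquare(L):
-- 	# Your code goes here
-- 	rowtofix,correctsum = getrowandsum(L)
-- 	s = set()
-- 	for i in L:
-- 		s2 = set(i)
-- 		s = s|s2
-- 	missing = missingnumber(s,L)
-- 	for i in range(len(L[rowtofix])):
-- 		temp = [] + L[rowtofix]
-- 		temp[i] = missing
-- 		if sum(temp) == correctsum:
-- 			L[rowtofix] = temp
-- 	return L
-- ===== SOURCE B (Python) =====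
-- def fixmostlymagicsquare(L):
--     n = len(L)
--     sums = [sum(row) for row in L]
--     freq = {}
--     for s in sums:
--         freq[s] = freq.get(s, 0) + 1
--     rowtofix = 0
--     for i in range(1, n):
--         if freq[sums[i]] < freq[sums[rowtofix]]:
--             rowtofix = i
--     correctsum = sums[1] if rowtofix == 0 else sums[0]
--     present = {x for row in L for x in row}
--     missing = 0
--     for v in range(n * n, 0, -1):
--         if v not in present:
--             missing = v
--             break
--     row = L[rowtofix]
--     target = sum(row) + missing - correctsum
--     if target in row:
--         fixed = row.copy()
--         fixed[row.index(target)] = missing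
--         L[rowtofix] = fixed
--     return L
-- ===== Notes on version B (the rewrite author's own statement) =====
-- stated objective: faster
-- what changed: B inlines the helpers and replaces A's try-every-position row fix (copy the row, overwrite position i, re-sum the whole row for every i) by a closed-form target value (target = rowsum + missing - correctsum) placed at the first matching position, picks the min-frequency row by a single argmin pass instead of counts.index(min(counts)), and finds the missing number by scanning n^2..1 backwards with early exit instead of a full forward scan keeping the last absent value.
import Mathlib
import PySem

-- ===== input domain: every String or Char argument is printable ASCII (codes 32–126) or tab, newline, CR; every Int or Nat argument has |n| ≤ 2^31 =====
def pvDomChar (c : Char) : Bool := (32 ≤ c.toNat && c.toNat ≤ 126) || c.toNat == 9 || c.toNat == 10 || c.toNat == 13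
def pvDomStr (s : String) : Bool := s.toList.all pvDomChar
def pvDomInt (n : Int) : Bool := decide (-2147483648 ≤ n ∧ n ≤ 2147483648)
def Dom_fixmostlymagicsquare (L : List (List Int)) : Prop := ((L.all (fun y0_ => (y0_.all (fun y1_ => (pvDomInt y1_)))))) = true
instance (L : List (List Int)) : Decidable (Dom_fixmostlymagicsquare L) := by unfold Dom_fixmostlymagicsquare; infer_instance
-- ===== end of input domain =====

-- B replaces A's try-every-position row fix by a closed-form target value placed at the
-- first matching position, a one-pass argmin for the row choice, and a backward
-- early-exit scan for the missing number (objective: alternative; equal return values).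
-- A mutates its argument in place (L[rowtofix] = temp); the equivalence proved here is
-- about the RETURN value only (B performs the same mutation in Python).

-- ===== PORT A =====
def pvA_getrowandsum (L : List (List Int)) : Nat × Int :=
  let sums : List Int := L.map (fun i => i.sum)
  let d : PySem.Dict Int Int := L.foldl (fun d i =>
      let S := i.sum
      if d.contains S then d.insert S (d.getD S 0 + 1) else d.insert S 1) PySem.Dict.empty
  let counts : List Int := sums.map (fun i => d.getD i 0)
  let rowtofix : Nat := (PySem.List.index? counts ((PySem.List.min? counts (fun x => x)).getD 0)).getD 0
  let correctsum : Int := (PySem.List.pyGet? sums 0).getD 0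
  let correctsum : Int := if rowtofix = 0 then (PySem.List.pyGet? sums 1).getD 0 else correctsum
  (rowtofix, correctsum)

def pvA_missingnumber (s : PySem.Set Int) (L : List (List Int)) : Int :=
  (PySem.List.pyRange 1 ((L.length : Int) ^ 2 + 1) 1).foldl
    (fun missing i => if PySem.Set.contains s i then missing else i) 0

def fixmostlymagicsquare (L : List (List Int)) : List (List Int) :=
  let p := pvA_getrowandsum L
  let rowtofix : Nat := p.1
  let correctsum : Int := p.2
  let s : PySem.Set Int := L.foldl (fun s i => PySem.Set.union s (PySem.Set.ofList i)) PySem.Set.empty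
  let missing : Int := pvA_missingnumber s L
  let row0 : List Int := (PySem.List.pyGet? L (rowtofix : Int)).getD []
  (PySem.List.pyRange 0 (row0.length : Int) 1).foldl
    (fun G i =>
      let temp := PySem.List.pySetD ((PySem.List.pyGet? G (rowtofix : Int)).getD []) i missing
      if temp.sum = correctsum then PySem.List.pySetD G (rowtofix : Int) temp else G) L

-- ===== PORT B =====
-- the 'for v in range(n*n, 0, -1): … break' loop of Source B
def pvFindAbsent (pres : PySem.Set Int) : List Int → Int
  | [] => 0
  | v :: rest => if PySem.Set.contains pres v then pvFindAbsent pres rest else v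

def fixmostlymagicsquare_alt (L : List (List Int)) : List (List Int) :=
  let n : Nat := L.length
  let sums : List Int := L.map (fun row => row.sum)
  let freq : PySem.Dict Int Int := sums.foldl (fun d s => d.insert s (d.getD s 0 + 1)) PySem.Dict.empty
  let rowtofix : Int := (PySem.List.pyRange 1 (n : Int) 1).foldl
      (fun rtf i => if freq.getD ((PySem.List.pyGet? sums i).getD 0) 0
                      < freq.getD ((PySem.List.pyGet? sums rtf).getD 0) 0 then i else rtf) 0
  let correctsum : Int := if rowtofix = 0 then (PySem.List.pyGet? sums 1).getD 0
                          else (PySem.List.pyGet? sums 0).getD 0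
  let present : PySem.Set Int := PySem.Set.ofList (L.flatMap (fun row => row))
  let missing : Int := pvFindAbsent present (PySem.List.pyRange ((n : Int) * (n : Int)) 0 (-1))
  let row : List Int := (PySem.List.pyGet? L rowtofix).getD []
  let target : Int := row.sum + missing - correctsum
  if row.contains target then
    let fixed := PySem.List.pySetD row (((PySem.List.index? row target).getD 0 : Nat) : Int) missing
    PySem.List.pySetD L rowtofix fixed
  else L

-- ===== PRECONDITION & SPEC =====
-- Pre_ excludes grids with fewer than 2 rows: A raises on every such input (a ValueError
-- from min of an empty sequence, or an IndexError reading the second row sum), and B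
-- raises there too.
def Pre_fixmostlymagicsquare (L : List (List Int)) : Prop := 2 ≤ L.length
instance (L : List (List Int)) : Decidable (Pre_fixmostlymagicsquare L) := by unfold Pre_fixmostlymagicsquare; infer_instance
def pvWitness_fixmostlymagicsquare : List (List Int) := [[8, 1, 6], [3, 5, 7], [4, 9, 0]]

def Spec_fixmostlymagicsquare (L : List (List Int)) (out : List (List Int)) : Prop := out = fixmostlymagicsquare_alt L
instance (L : List (List Int)) (out : List (List Int)) : Decidable (Spec_fixmostlymagicsquare L out) := by unfold Spec_fixmostlymagicsquare; infer_instance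

-- ===== CLAIM (what is proved, stated in full; the proofs are below) =====
def Claim_equal_fixmostlymagicsquare : Prop := ∀ (L : List (List Int)), Dom_fixmostlymagicsquare L → Pre_fixmostlymagicsquare L → Spec_fixmostlymagicsquare L (fixmostlymagicsquare L)

-- ===== LEMMAS AND PROOFS =====


theorem pv_dict_step (d : PySem.Dict Int Int) (S : Int) :
    (if d.contains S then d.insert S (d.getD S 0 + 1) else d.insert S 1)
      = d.insert S (d.getD S 0 + 1) := by
  by_cases h : d.contains S
  · simp [h]
  · simp only [Bool.not_eq_true] at h
    rw [PySem.Dict.getD_of_not_contains d 0 h]; simp [h]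

theorem pv_mem_union_foldl (L : List (List Int)) (init : PySem.Set Int) (y : Int) :
    y ∈ L.foldl (fun s i => PySem.Set.union s (PySem.Set.ofList i)) init
      ↔ y ∈ init ∨ ∃ r ∈ L, y ∈ r := by
  induction L generalizing init with
  | nil => simp
  | cons hd tl ih =>
    simp [List.foldl_cons, ih, PySem.Set.mem_union, PySem.Set.mem_ofList, or_assoc]

theorem pv_foldl_fix {α β : Type} (f : α → β → α) (a : α) (l : List β)
    (h : ∀ x ∈ l, f a x = a) : l.foldl f a = a := by
  induction l with
  | nil => rfl
  | cons hd tl ih =>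
    simp only [List.foldl_cons, h hd (by simp)]
    exact ih (fun x hx => h x (by simp [hx]))

theorem pv_sum_set (l : List Int) (j : Nat) (a : Int) (h : j < l.length) :
    (l.set j a).sum = l.sum - l.getD j 0 + a := by
  induction l generalizing j with
  | nil => simp at h
  | cons hd tl ih =>
    cases j with
    | zero => simp [List.sum_cons]; ring
    | succ j =>
      simp only [List.set_cons_succ, List.sum_cons, List.getD_cons_succ]
      rw [ih j (by simpa using h)]; ring



theorem pv_missing_eq (s : PySem.Set Int) (N : Nat) :
    (PySem.List.pyRange 1 ((N : Int) + 1) 1).foldl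
        (fun missing i => if PySem.Set.contains s i then missing else i) 0
      = pvFindAbsent s (PySem.List.pyRange (N : Int) 0 (-1)) := by
  induction N with
  | zero =>
    rw [PySem.List.pyRange_one_eq_nil (by norm_num), PySem.List.pyRange_neg_one_eq_nil (by norm_num)]
    rfl
  | succ N ih =>
    have h1 : ((N + 1 : Nat) : Int) + 1 = ((N : Int) + 1) + 1 := by push_cast; ring
    rw [h1, PySem.List.pyRange_one_succ_right (by omega), List.foldl_append]
    have h2 : ((N + 1 : Nat) : Int) = (N : Int) + 1 := by push_cast; ring
    rw [h2, PySem.List.pyRange_neg_one_cons (by omega)]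
    simp only [List.foldl_cons, List.foldl_nil, add_sub_cancel_right, pvFindAbsent]
    split_ifs with h
    · simpa using ih
    · rfl


theorem pv_argmin_fold (c : List Int) (g : Int → Int)
    (hg : ∀ j : Nat, j < c.length → g (j : Int) = c.getD j 0) :
    ∀ k : Nat, 1 ≤ k → k ≤ c.length →
    ∃ r : Nat, (PySem.List.pyRange 1 (k : Int) 1).foldl
        (fun rtf i => if g i < g rtf then i else rtf) 0 = (r : Int)
      ∧ r < k ∧ (∀ j : Nat, j < k → c.getD r 0 ≤ c.getD j 0)
      ∧ (∀ j : Nat, j < r → c.getD r 0 < c.getD j 0) := by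
  intro k
  induction k with
  | zero => omega
  | succ k ih =>
    intro _ hk
    by_cases hk1 : 1 ≤ k
    · obtain ⟨r, hr, hrk, hmin, hfirst⟩ := ih hk1 (by omega)
      have h1 : ((k + 1 : Nat) : Int) = (k : Int) + 1 := by push_cast; ring
      rw [h1, PySem.List.pyRange_one_succ_right (by omega), List.foldl_append]
      simp only [List.foldl_cons, List.foldl_nil, hr]
      rw [hg k (by omega), hg r (by omega)]
      by_cases hlt : c.getD k 0 < c.getD r 0
      · refine ⟨k, by rw [if_pos hlt], by omega, ?_, ?_⟩
        · intro j hj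
          rcases Nat.lt_succ_iff_lt_or_eq.mp hj with hj' | hj'
          · exact le_trans (le_of_lt hlt) (hmin j hj')
          · simp [hj']
        · intro j hj
          exact lt_of_lt_of_le hlt (hmin j (by omega))
      · refine ⟨r, by rw [if_neg hlt], by omega, ?_, hfirst⟩
        intro j hj
        rcases Nat.lt_succ_iff_lt_or_eq.mp hj with hj' | hj'
        · exact hmin j hj'
        · subst hj'; omega
    · have hk0 : k = 0 := by omega
      subst hk0
      refine ⟨0, ?_, by omega, ?_, by omega⟩
      · rw [PySem.List.pyRange_one_eq_nil (by norm_num)]; rfl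
      · intro j hj; interval_cases j; rfl


theorem pv_argmin_unique (c : List Int) (r r' : Nat)
    (hmin : ∀ j : Nat, j < c.length → c.getD r 0 ≤ c.getD j 0)
    (hfirst : ∀ j : Nat, j < r → c.getD r 0 < c.getD j 0)
    (hr' : r' < c.length)
    (hmin' : ∀ j : Nat, j < c.length → c.getD r' 0 ≤ c.getD j 0)
    (hfirst' : ∀ j : Nat, j < r' → c.getD r' 0 < c.getD j 0)
    (hr : r < c.length) : r = r' := by
  rcases lt_trichotomy r r' with h | h | h
  · have h1 := hfirst' r h
    have h3 := hmin r' hr'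
    omega
  · exact h
  · have h1 := hfirst r' h
    have h3 := hmin' r hr
    omega

theorem pv_index_min_spec (c : List Int) (hc : c ≠ []) :
    ∃ r : Nat, (PySem.List.index? c ((PySem.List.min? c (fun x => x)).getD 0)).getD 0 = r
      ∧ r < c.length ∧ (∀ j : Nat, j < c.length → c.getD r 0 ≤ c.getD j 0)
      ∧ (∀ j : Nat, j < r → c.getD r 0 < c.getD j 0) := by
  obtain ⟨m, hm⟩ : ∃ m, PySem.List.min? c (fun x => x) = some m := by
    cases h : PySem.List.min? c (fun x => x) with
    | none => exact absurd ((PySem.List.min?_eq_none_iff c _).mp h) hc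
    | some m => exact ⟨m, rfl⟩
  have hmem : m ∈ c := PySem.List.min?_mem hm
  have hmin : ∀ y ∈ c, m ≤ y := PySem.List.min?_isMin hm
  obtain ⟨i, hi⟩ : ∃ i, List.idxOf? m c = some i := by
    cases h : List.idxOf? m c with
    | none => simp [List.idxOf?_eq_none_iff] at h; exact absurd hmem h
    | some i => exact ⟨i, rfl⟩
  obtain ⟨hlen, hval, hprev⟩ := List.idxOf?_eq_some_iff.mp hi
  refine ⟨i, ?_, hlen, ?_, ?_⟩
  · simp [PySem.List.index?, hm, hi]
  · intro j hj
    rw [List.getD_eq_getElem c 0 hlen, List.getD_eq_getElem c 0 hj, hval]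
    exact hmin _ (List.getElem_mem hj)
  · intro j hj
    have hjlen : j < c.length := lt_trans hj hlen
    rw [List.getD_eq_getElem c 0 hlen, List.getD_eq_getElem c 0 hjlen, hval]
    exact lt_of_le_of_ne (hmin _ (List.getElem_mem hjlen)) (fun h => (hprev j hj) h.symm)




theorem pv_grid_to_row (L : List (List Int)) (k : Nat) (hk : k < L.length) (m c : Int)
    (l : List Int) : ∀ ρ : List Int,
    l.foldl (fun G i =>
        let temp := PySem.List.pySetD ((PySem.List.pyGet? G (k : Int)).getD []) i m
        if temp.sum = c then PySem.List.pySetD G (k : Int) temp else G) (L.set k ρ)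
      = L.set k (l.foldl (fun ρ i =>
        let temp := PySem.List.pySetD ρ i m
        if temp.sum = c then temp else ρ) ρ) := by
  induction l with
  | nil => intro ρ; rfl
  | cons hd tl ih =>
    intro ρ
    have hget : (PySem.List.pyGet? (L.set k ρ) (k : Int)).getD [] = ρ := by
      rw [PySem.List.pyGet?_natCast]
      simp [hk]
    simp only [List.foldl_cons, hget]
    by_cases h : (PySem.List.pySetD ρ hd m).sum = c
    · simp only [h, if_pos]
      rw [PySem.List.pySetD_natCast, List.set_set]
      exact ih _
    · simp only [h, if_false]
      exact ih _

theorem pv_row_fix (r : List Int) (m c : Int) :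
    (PySem.List.pyRange 0 (r.length : Int) 1).foldl
        (fun ρ i =>
          let temp := PySem.List.pySetD ρ i m
          if temp.sum = c then temp else ρ) r
      = if r.contains (r.sum + m - c)
        then r.set ((List.idxOf? (r.sum + m - c) r).getD 0) m
        else r := by
  by_cases hc : (r.sum + m - c) ∈ r
  · rw [if_pos (by simpa using hc)]
    obtain ⟨i₀, hi₀⟩ : ∃ i₀, List.idxOf? (r.sum + m - c) r = some i₀ := by
      cases h : List.idxOf? (r.sum + m - c) r with
      | none => rw [List.idxOf?_eq_none_iff] at h; exact absurd hc h
      | some i₀ => exact ⟨i₀, rfl⟩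
    obtain ⟨hlen, hval, hprev⟩ := List.idxOf?_eq_some_iff.mp hi₀
    rw [hi₀]
    rw [PySem.List.pyRange_one_append 0 (i₀ : Int) (r.length : Int) (by omega) (by exact_mod_cast hlen.le),
        List.foldl_append]
    rw [pv_foldl_fix _ r _ (by
      intro x hx
      rw [PySem.List.mem_pyRange_one] at hx
      have hxl : x.toNat < i₀ := by omega
      have hxlen : x.toNat < r.length := by omega
      try dsimp only
      rw [PySem.List.pySetD_of_nonneg _ _ (by omega : (0:Int) ≤ x),
          pv_sum_set _ _ _ hxlen]
      rw [if_neg ?_]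
      rw [List.getD_eq_getElem r 0 hxlen]
      intro hsum
      exact hprev x.toNat hxl (by omega))]
    rw [PySem.List.pyRange_one_cons (by exact_mod_cast hlen)]
    simp only [List.foldl_cons]
    have hi0 : PySem.List.pySetD r ((i₀ : Nat) : Int) m = r.set i₀ m := PySem.List.pySetD_natCast r i₀ m
    rw [hi0]
    have hsum0 : (r.set i₀ m).sum = c := by
      rw [pv_sum_set _ _ _ hlen, List.getD_eq_getElem r 0 hlen, hval]; ring
    rw [if_pos hsum0]
    apply pv_foldl_fix
    intro x hx
    rw [PySem.List.mem_pyRange_one] at hx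
    have hxlen : x.toNat < r.length := by omega
    have hxlen' : x.toNat < (r.set i₀ m).length := by simpa using hxlen
    try dsimp only
    rw [PySem.List.pySetD_of_nonneg _ _ (by omega : (0:Int) ≤ x)]
    by_cases hs : ((r.set i₀ m).set x.toNat m).sum = c
    · rw [if_pos hs]
      rw [pv_sum_set _ _ _ hxlen'] at hs
      have : (r.set i₀ m).getD x.toNat 0 = m := by omega
      rw [List.getD_eq_getElem _ 0 hxlen'] at this
      have h2 := List.set_getElem_self hxlen'
      rw [this] at h2
      exact h2
    · rw [if_neg hs]
  · rw [if_neg (by simpa using hc)]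
    apply pv_foldl_fix
    intro x hx
    rw [PySem.List.mem_pyRange_one] at hx
    have hxlen : x.toNat < r.length := by omega
    try dsimp only
    rw [PySem.List.pySetD_of_nonneg _ _ (by omega : (0:Int) ≤ x), pv_sum_set _ _ _ hxlen]
    rw [if_neg ?_]
    intro hsum
    have : r.getD x.toNat 0 = r.sum + m - c := by omega
    rw [List.getD_eq_getElem _ 0 hxlen] at this
    exact hc (this ▸ List.getElem_mem hxlen)

-- ===== VERDICT (by name: the statement is the Claim_ definition above) =====
theorem fixmostlymagicsquare_spec : Claim_equal_fixmostlymagicsquare := by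
  intro L _ hPre
  unfold Pre_fixmostlymagicsquare at hPre
  unfold Spec_fixmostlymagicsquare
  show fixmostlymagicsquare L = fixmostlymagicsquare_alt L
  unfold fixmostlymagicsquare fixmostlymagicsquare_alt pvA_getrowandsum pvA_missingnumber
  dsimp only
  -- dict folds on both sides are Counter(sums)
  have hdict : (fun (d : PySem.Dict Int Int) (i : List Int) =>
      if d.contains i.sum then d.insert i.sum (d.getD i.sum 0 + 1) else d.insert i.sum 1)
      = (fun (d : PySem.Dict Int Int) (i : List Int) => d.insert i.sum (d.getD i.sum 0 + 1)) :=
    funext fun d => funext fun i => pv_dict_step d i.sum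
  rw [hdict]
  rw [← List.foldl_map (f := fun i : List Int => i.sum)
        (g := fun (d : PySem.Dict Int Int) (s : Int) => d.insert s (d.getD s 0 + 1))]
  rw [PySem.Dict.foldl_insert_getD_add_one_eq_counter]
  set sums : List Int := L.map (fun i => i.sum) with hsums
  have hslen : sums.length = L.length := by rw [hsums]; simp
  set counts : List Int := sums.map (fun i => (PySem.Dict.counter sums).getD i 0) with hcounts
  have hclen : counts.length = L.length := by rw [hcounts]; simp [hslen]
  -- the chosen row: A's counts.index(min(counts)) = B's one-pass argmin
  obtain ⟨rA, hrAeq, hrAlt, hrAmin, hrAfirst⟩ :=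
    pv_index_min_spec counts (by intro h; rw [h] at hclen; simp at hclen; omega)
  rw [hrAeq]
  set g : Int → Int := fun i => (PySem.Dict.counter sums).getD ((PySem.List.pyGet? sums i).getD 0) 0 with hgdef
  have hg : ∀ j : Nat, j < counts.length → g (j : Int) = counts.getD j 0 := by
    intro j hj
    have hjs : j < sums.length := by omega
    show (PySem.Dict.counter sums).getD ((PySem.List.pyGet? sums (j : Int)).getD 0) 0 = counts.getD j 0
    rw [PySem.List.pyGet?_natCast, List.getElem?_eq_getElem hjs]
    rw [hcounts, List.getD_eq_getElem _ 0 (by simpa using hjs), List.getElem_map]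
    simp [hsums]
  obtain ⟨rB, hrBeq, hrBlt, hrBmin, hrBfirst⟩ :=
    pv_argmin_fold counts g hg L.length (by omega) (by omega)
  have hrr : rA = rB :=
    pv_argmin_unique counts rA rB hrAmin hrAfirst (by omega)
      (fun j hj => hrBmin j (by omega)) hrBfirst (by omega)
  rw [hrBeq, ← hrr]
  simp only [Int.natCast_eq_zero]
  -- the union-of-row-sets equals the set of all entries
  set sA : PySem.Set Int := L.foldl (fun s i => PySem.Set.union s (PySem.Set.ofList i)) PySem.Set.empty with hsA
  set pres : PySem.Set Int := PySem.Set.ofList (L.flatMap (fun row => row)) with hpres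
  have hcont : ∀ y : Int, PySem.Set.contains sA y = PySem.Set.contains pres y := by
    intro y
    rw [Bool.eq_iff_iff, PySem.Set.contains_iff, PySem.Set.contains_iff, hsA, hpres,
        pv_mem_union_foldl]
    simp only [PySem.Set.mem_ofList, List.mem_flatMap, PySem.Set.empty, List.not_mem_nil,
      false_or]
  have hstep : (fun (missing i : Int) => if PySem.Set.contains sA i then missing else i)
      = (fun (missing i : Int) => if PySem.Set.contains pres i then missing else i) := by
    funext a b; rw [hcont]
  rw [hstep]
  have hN : ((L.length : Int)) ^ 2 + 1 = ((L.length ^ 2 : Nat) : Int) + 1 := by push_cast; ring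
  have hN2 : ((L.length : Int)) * (L.length : Int) = ((L.length ^ 2 : Nat) : Int) := by push_cast; ring
  rw [hN, pv_missing_eq pres (L.length ^ 2), hN2]
  set miss : Int := pvFindAbsent pres (PySem.List.pyRange (((L.length ^ 2 : Nat) : Int)) 0 (-1)) with hmiss
  set csum : Int := (if rA = 0 then (PySem.List.pyGet? sums 1).getD 0 else (PySem.List.pyGet? sums 0).getD 0) with hcsum
  -- the fix row
  have hlt : rA < L.length := by omega
  have hrow : (PySem.List.pyGet? L ((rA : Nat) : Int)).getD [] = L[rA]'hlt := by
    rw [PySem.List.pyGet?_natCast, List.getElem?_eq_getElem hlt]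
    rfl
  rw [hrow]
  -- A's grid loop = the row-level first-match fix
  have hgrid := pv_grid_to_row L rA hlt miss csum
    (PySem.List.pyRange 0 (((L[rA]'hlt).length : Int)) 1) (L[rA]'hlt)
  rw [List.set_getElem_self hlt] at hgrid
  rw [hgrid, pv_row_fix (L[rA]'hlt) miss csum, apply_ite (L.set rA),
      List.set_getElem_self hlt]
  simp only [PySem.List.index?, PySem.List.pySetD_natCast]
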